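-- pv_equiv track=rewrite | github.com/hamiltonw/bd2k_tda | stability_example.py | check_if_subsimp
-- ===== SOURCE A (Python) =====
-- def check_if_subsimp(simp1,simp2):
-- 	l = len(simp1)
-- 	if l > len(simp2):
-- 		return 0
-- 	else:
-- 		for i in range(len(simp2)):
-- 			if (i+l)>len(simp2):
-- 				test_simp = simp2[i:] + simp2[:(i+l)%len(simp2)]
-- 			else:
-- 				test_simp = simp2[i:i+l]
-- 			if (test_simp == simp1) | (test_simp == simp1[::-1]):
-- 				if len(simp2) == len(simp1):
-- 					return 2
-- 				return 1
-- 		return 0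
-- ===== SOURCE B (Python) =====
-- def _poly_hash(seq, base, mod):
--     v = 0
--     for x in seq:
--         v = (v * base + x) % mod
--     return v
--
-- def _rk_find(pat1, pat2, text, n, base, mod):
--     # Rabin-Karp: is pat1 or pat2 (both of length l >= 1) a window of text
--     # starting at some j in 0..n-1?  Rolling hash, verify only on a hash hit.
--     l = len(pat1)
--     t1 = _poly_hash(pat1, base, mod)
--     t2 = _poly_hash(pat2, base, mod)
--     powl = pow(base, l - 1, mod)
--     hv = _poly_hash(text[:l], base, mod)
--     for j in range(n):
--         if (hv == t1 and text[j:j+l] == pat1) or (hv == t2 and text[j:j+l] == pat2):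
--             return True
--         if j + 1 < n:
--             hv = ((hv - text[j] * powl) * base + text[j + l]) % mod
--     return False
--
-- def check_if_subsimp(simp1, simp2):
--     l, n = len(simp1), len(simp2)
--     if l > n:
--         return 0
--     if n == 0:
--         return 0
--     if l == 0:
--         return 1
--     text = simp2 + simp2[:l - 1]
--     if _rk_find(simp1, simp1[::-1], text, n, 1 << 21, (1 << 61) - 1):
--         return 2 if l == n else 1
--     return 0
-- ===== Notes on version B (the rewrite author's own statement) =====
-- stated objective: faster
-- what changed: B replaces A's per-index cyclic slice-and-compare by a Rabin-Karp rolling-hash scan over the doubled list simp2 + simp2[:l-1]: one O(1) modular hash update per position for simp1 and its reverse, with the O(l) window comparison performed only on a hash hit.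
import Mathlib
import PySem

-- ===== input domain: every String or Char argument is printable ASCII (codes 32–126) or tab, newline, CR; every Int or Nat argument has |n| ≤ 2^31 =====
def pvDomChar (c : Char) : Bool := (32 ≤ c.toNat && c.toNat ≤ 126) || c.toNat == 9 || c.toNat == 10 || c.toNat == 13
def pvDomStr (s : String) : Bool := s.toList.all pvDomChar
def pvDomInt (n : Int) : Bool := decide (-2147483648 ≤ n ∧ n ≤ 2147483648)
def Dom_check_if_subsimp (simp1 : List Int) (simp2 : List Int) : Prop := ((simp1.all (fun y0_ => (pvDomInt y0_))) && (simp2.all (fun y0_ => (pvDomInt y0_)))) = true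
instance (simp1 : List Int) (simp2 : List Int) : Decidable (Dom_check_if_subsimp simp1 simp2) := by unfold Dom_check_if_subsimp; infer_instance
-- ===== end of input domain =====

-- B replaces A's per-index modular window slicing by a Rabin-Karp rolling-hash scan of
-- simp1 and its reverse over the doubled list simp2 ++ simp2[:l-1]: O(1) hash update per
-- position, the O(l) window comparison only on a hash hit (objective: faster).


-- ===== PORT A =====
-- A's for-loop with early return, over the remaining indices i of range(len(simp2));
-- simp1[::-1] is simp1.reverse.
def goA (simp1 simp2 : List Int) : List Int → Int
  | [] => 0
  | i :: rest =>
    let l : Int := simp1.length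
    let test_simp : List Int :=
      if i + l > (simp2.length : Int) then
        PySem.List.slice simp2 (some i) none ++
          PySem.List.slice simp2 none (some (PySem.Int.mod (i + l) (simp2.length : Int)))
      else
        PySem.List.slice simp2 (some i) (some (i + l))
    if test_simp == simp1 || test_simp == simp1.reverse then
      (if (simp2.length : Int) == (simp1.length : Int) then 2 else 1)
    else goA simp1 simp2 rest

def check_if_subsimp (simp1 : List Int) (simp2 : List Int) : Int :=
  let l : Int := simp1.length
  if l > (simp2.length : Int) then 0
  else goA simp1 simp2 (PySem.List.pyRange 0 (simp2.length : Int) 1)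

-- ===== PORT B =====
-- _poly_hash(seq, base, mod): fold (v*base + x) % mod over seq
def polyHash (base M : Int) (seq : List Int) : Int :=
  seq.foldl (fun v x => PySem.Int.mod (v * base + x) M) 0

-- the for-loop of _rk_find over the remaining j of range(n), carrying the rolling hash hv;
-- text[j] / text[j+l] are ported with pyGetD (the indices are always in range: j < n ≤ |text|
-- and j+l < |text| when j+1 < n, so this is exactly Python's indexing on every reached state)
def rkLoop (pat1 pat2 text : List Int) (t1 t2 powl base M : Int) (l : Nat) (n : Int) :
    List Int → Int → Bool
  | [], _ => false
  | j :: rest, hv =>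
    if (hv == t1 && PySem.List.slice text (some j) (some (j + (l : Int))) == pat1)
        || (hv == t2 && PySem.List.slice text (some j) (some (j + (l : Int))) == pat2) then
      true
    else
      rkLoop pat1 pat2 text t1 t2 powl base M l n rest
        (if j + 1 < n then
          PySem.Int.mod
            ((hv - PySem.List.pyGetD text j 0 * powl) * base + PySem.List.pyGetD text (j + (l : Int)) 0) M
        else hv)

-- _rk_find(pat1, pat2, text, n, base, mod); pow(base, l-1, mod) is PySem.Int.powMod
def rkFind (pat1 pat2 text : List Int) (n base M : Int) : Bool :=
  let l := pat1.length
  let t1 := polyHash base M pat1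
  let t2 := polyHash base M pat2
  let powl := PySem.Int.powMod base (l - 1) M
  let hv := polyHash base M (PySem.List.slice text none (some (l : Int)))
  rkLoop pat1 pat2 text t1 t2 powl base M l n (PySem.List.pyRange 0 n 1) hv

def check_if_subsimp_alt (simp1 : List Int) (simp2 : List Int) : Int :=
  let l := simp1.length
  let n := simp2.length
  if l > n then 0
  else if n = 0 then 0
  else if l = 0 then 1
  else
    let text := simp2 ++ PySem.List.slice simp2 none (some ((l : Int) - 1))
    if rkFind simp1 simp1.reverse text (n : Int) (2 ^ 21) (2 ^ 61 - 1) then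
      (if l = n then 2 else 1)
    else 0

-- ===== PRECONDITION & SPEC =====
def Spec_check_if_subsimp (simp1 : List Int) (simp2 : List Int) (out : Int) : Prop := out = check_if_subsimp_alt simp1 simp2
instance (simp1 : List Int) (simp2 : List Int) (out : Int) : Decidable (Spec_check_if_subsimp simp1 simp2 out) := by unfold Spec_check_if_subsimp; infer_instance

-- ===== CLAIM (what is proved, stated in full; the proofs are below) =====
def Claim_equal_check_if_subsimp : Prop := ∀ (simp1 : List Int) (simp2 : List Int), Dom_check_if_subsimp simp1 simp2 → Spec_check_if_subsimp simp1 simp2 (check_if_subsimp simp1 simp2)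

-- ===== LEMMAS AND PROOFS =====

-- A's window at index i, as written in A
def win (simp1 simp2 : List Int) (i : Int) : List Int :=
  if i + (simp1.length : Int) > (simp2.length : Int) then
    PySem.List.slice simp2 (some i) none ++
      PySem.List.slice simp2 none (some (PySem.Int.mod (i + (simp1.length : Int)) (simp2.length : Int)))
  else
    PySem.List.slice simp2 (some i) (some (i + (simp1.length : Int)))

-- the pure (un-modded) polynomial fold
def pfold (base a : Int) (xs : List Int) : Int :=
  xs.foldl (fun v x => v * base + x) a

theorem pfold_emod (base M : Int) (hM : 0 < M) (xs : List Int) :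
    ∀ a : Int, xs.foldl (fun v x => PySem.Int.mod (v * base + x) M) (a % M)
      = pfold base a xs % M := by
  induction xs with
  | nil => intro a; rfl
  | cons x xs ih =>
    intro a
    have h1 : PySem.Int.mod (a % M * base + x) M = (a * base + x) % M := by
      rw [PySem.Int.mod_eq_emod_of_pos hM, Int.add_emod, Int.mul_emod,
        Int.emod_emod_of_dvd _ dvd_rfl, ← Int.mul_emod, ← Int.add_emod]
    simp only [List.foldl_cons, h1]
    rw [ih (a * base + x)]
    rfl

theorem polyHash_eq (base M : Int) (hM : 0 < M) (xs : List Int) :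
    polyHash base M xs = pfold base 0 xs % M := by
  unfold polyHash
  have h := pfold_emod base M hM xs 0
  rwa [Int.zero_emod] at h

theorem pfold_shift (base : Int) (xs : List Int) :
    ∀ a : Int, pfold base a xs = a * base ^ xs.length + pfold base 0 xs := by
  induction xs with
  | nil => intro a; simp [pfold]
  | cons x xs ih =>
    intro a
    simp only [pfold, List.foldl_cons, List.length_cons, zero_mul, zero_add] at *
    rw [ih (a * base + x), ih x]
    ring

theorem pfold_snoc (base a d : Int) (xs : List Int) :
    pfold base a (xs ++ [d]) = pfold base a xs * base + d := by
  simp [pfold, List.foldl_append]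

-- the Rabin-Karp rolling update is exact
theorem roll (base M c d : Int) (hM : 0 < M) (m : List Int) :
    PySem.Int.mod
      ((polyHash base M (c :: m) - c * PySem.Int.mod (base ^ m.length) M) * base + d) M
      = polyHash base M (m ++ [d]) := by
  rw [PySem.Int.mod_eq_emod_of_pos hM, PySem.Int.mod_eq_emod_of_pos hM,
    polyHash_eq base M hM, polyHash_eq base M hM, pfold_snoc]
  have hc : pfold base 0 (c :: m) = c * base ^ m.length + pfold base 0 m := by
    simp only [pfold, List.foldl_cons, zero_mul, zero_add]
    exact pfold_shift base m c
  rw [hc]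
  have h1 : Int.ModEq M ((c * base ^ m.length + pfold base 0 m) % M)
      (c * base ^ m.length + pfold base 0 m) := Int.emod_emod_of_dvd _ dvd_rfl
  have h2 : Int.ModEq M (c * (base ^ m.length % M)) (c * base ^ m.length) :=
    Int.ModEq.mul_left c (Int.emod_emod_of_dvd _ dvd_rfl)
  have h3 := ((h1.sub h2).mul_right base).add_right d
  have h4 : (c * base ^ m.length + pfold base 0 m - c * base ^ m.length) * base + d
      = pfold base 0 m * base + d := by ring
  rw [h4] at h3
  exact h3

-- sliding one position: how window j+1 is obtained from window j
theorem window_shift (text : List Int) (j l : Nat) (hl : 1 ≤ l) (hjl : j + l < text.length) :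
    (text.drop j).take l = text.getD j 0 :: (text.drop (j + 1)).take (l - 1) ∧
      (text.drop (j + 1)).take l = (text.drop (j + 1)).take (l - 1) ++ [text.getD (j + l) 0] := by
  obtain ⟨l', rfl⟩ : ∃ l', l = l' + 1 := ⟨l - 1, by omega⟩
  have hjlt : j < text.length := by omega
  simp only [Nat.add_sub_cancel]
  constructor
  · rw [List.drop_eq_getElem_cons hjlt, List.take_succ_cons, List.getD_eq_getElem _ _ hjlt]
  · have hlen1 : l' < (text.drop (j + 1)).length := by
      simp only [List.length_drop]; omega
    rw [List.take_add_one, List.getElem?_eq_getElem hlen1]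
    simp only [List.getElem_drop, Option.toList_some]
    rw [List.getD_eq_getElem _ _ hjl]
    have hidx : j + 1 + l' = j + (l' + 1) := by omega
    simp [hidx]

-- the rkLoop invariant: started at j with the true hash of window j, it reports
-- whether pat1 or pat2 is a window at some k in [j, n)
theorem rkLoop_iff (pat1 pat2 text : List Int) (base M : Int) (hM : 0 < M)
    (n : Nat) (hl : 1 ≤ pat1.length) (htext : text.length + 1 = n + pat1.length) :
    ∀ fuel j : Nat, n - j = fuel →
      (rkLoop pat1 pat2 text (polyHash base M pat1) (polyHash base M pat2)
          (PySem.Int.powMod base (pat1.length - 1) M) base M pat1.length (n : Int)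
          (PySem.List.pyRange (j : Int) (n : Int) 1)
          (polyHash base M ((text.drop j).take pat1.length)) = true
        ↔ ∃ k : Nat, j ≤ k ∧ k < n ∧
            ((text.drop k).take pat1.length = pat1 ∨ (text.drop k).take pat1.length = pat2)) := by
  intro fuel
  induction fuel with
  | zero =>
    intro j hj
    have hnj : n ≤ j := by omega
    rw [PySem.List.pyRange_one_eq_nil (by exact_mod_cast hnj)]
    simp only [rkLoop]
    constructor
    · intro h; exact absurd h (by simp)
    · rintro ⟨k, hk1, hk2, -⟩; omega
  | succ fuel ih =>
    intro j hj
    have hjn : j < n := by omega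
    rw [PySem.List.pyRange_one_cons (by exact_mod_cast hjn)]
    simp only [rkLoop]
    set w := (text.drop j).take pat1.length with hw
    have hslice : PySem.List.slice text (some (j : Int)) (some ((j : Int) + (pat1.length : Int))) = w :=
      PySem.List.slice_natCast_add text j pat1.length
    by_cases hhit : w = pat1 ∨ w = pat2
    · have hcond : ((polyHash base M w == polyHash base M pat1
            && PySem.List.slice text (some (j:Int)) (some ((j:Int) + (pat1.length : Int))) == pat1)
          || (polyHash base M w == polyHash base M pat2
            && PySem.List.slice text (some (j:Int)) (some ((j:Int) + (pat1.length : Int))) == pat2)) = true := by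
        rcases hhit with h | h <;> rw [hslice, h] <;> simp
      rw [if_pos hcond]
      simp only [true_iff]
      exact ⟨j, le_refl j, hjn, by rw [← hw]; exact hhit⟩
    · rw [not_or] at hhit
      have hcond : ((polyHash base M w == polyHash base M pat1
            && PySem.List.slice text (some (j:Int)) (some ((j:Int) + (pat1.length : Int))) == pat1)
          || (polyHash base M w == polyHash base M pat2
            && PySem.List.slice text (some (j:Int)) (some ((j:Int) + (pat1.length : Int))) == pat2)) = false := by
        rw [hslice]
        simp only [Bool.or_eq_false_iff, Bool.and_eq_false_iff, beq_eq_false_iff_ne, ne_eq]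
        exact ⟨Or.inr hhit.1, Or.inr hhit.2⟩
      rw [if_neg (by simp [hcond])]
      by_cases hnext : j + 1 < n
      · -- the rolling update produces the hash of window j+1
        have hcast : ((j : Int) + 1 < (n : Int)) := by exact_mod_cast hnext
        rw [if_pos hcast]
        set l := pat1.length with hldef
        have hjlt : j < text.length := by omega
        have hjl : j + l < text.length := by omega
        set m := (text.drop (j + 1)).take (l - 1) with hm
        have hmlen : m.length = l - 1 := by
          rw [hm]; simp only [List.length_take, List.length_drop]; omega
        have hcm : w = text.getD j 0 :: m := by
          rw [hw, hm]; exact (window_shift text j l hl hjl).1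
        have hwd : (text.drop (j + 1)).take l = m ++ [text.getD (j + l) 0] := by
          rw [hm]; exact (window_shift text j l hl hjl).2
        have hget1 : PySem.List.pyGetD text ((j : Nat) : Int) 0 = text.getD j 0 :=
          PySem.List.pyGetD_natCast text j 0
        have hget2 : PySem.List.pyGetD text ((j : Int) + (l : Int)) 0 = text.getD (j + l) 0 := by
          have : (j : Int) + (l : Int) = ((j + l : Nat) : Int) := by push_cast; ring
          rw [this, PySem.List.pyGetD_natCast]
        have hpow : PySem.Int.powMod base (l - 1) M = PySem.Int.mod (base ^ m.length) M := by
          rw [hmlen]; rfl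
        have hupd : PySem.Int.mod
            ((polyHash base M w - PySem.List.pyGetD text (j : Int) 0 * PySem.Int.powMod base (l - 1) M) * base
              + PySem.List.pyGetD text ((j : Int) + (l : Int)) 0) M
            = polyHash base M ((text.drop (j + 1)).take l) := by
          rw [hget1, hget2, hpow, hcm, hwd]
          exact roll base M (text.getD j 0) (text.getD (j + l) 0) hM m
        have hcast1 : (j : Int) + 1 = ((j + 1 : Nat) : Int) := by push_cast; ring
        rw [hupd, hcast1]
        rw [ih (j + 1) (by omega)]
        constructor
        · rintro ⟨k, hk1, hk2, hk3⟩; exact ⟨k, by omega, hk2, hk3⟩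
        · rintro ⟨k, hk1, hk2, hk3⟩
          refine ⟨k, by
            rcases Nat.eq_or_lt_of_le hk1 with rfl | h
            · exact absurd hk3 (by rw [← hw]; exact not_or.mpr hhit)
            · omega, hk2, hk3⟩
      · -- last iteration: the remaining range is empty
        have hj1 : n ≤ j + 1 := by omega
        have : PySem.List.pyRange ((j : Int) + 1) (n : Int) 1 = [] := by
          apply PySem.List.pyRange_one_eq_nil
          exact_mod_cast hj1
        rw [this]
        simp only [rkLoop]
        constructor
        · intro h; exact absurd h (by simp)
        · rintro ⟨k, hk1, hk2, hk3⟩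
          have hkj : k = j := by omega
          subst hkj
          exact absurd hk3 (by rw [← hw]; exact not_or.mpr hhit)

-- the doubled text both programs' windows live in (for 1 ≤ l ≤ n)
def dbl (simp1 simp2 : List Int) : List Int :=
  simp2 ++ simp2.take (simp1.length - 1)

-- A's window equals a window of the doubled text.
theorem win_eq_dbl (simp1 simp2 : List Int) (i : Nat)
    (hi : i < simp2.length) (hl : simp1.length ≤ simp2.length) (hl0 : 0 < simp1.length) :
    win simp1 simp2 (i : Int) = ((dbl simp1 simp2).drop i).take simp1.length := by
  unfold win dbl
  by_cases hc : simp2.length < i + simp1.length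
  · -- wrap-around window
    have hcast : ((i : Int) + (simp1.length : Int) > (simp2.length : Int)) := by
      exact_mod_cast hc
    rw [if_pos hcast]
    have hnat : (i + simp1.length) % simp2.length = i + simp1.length - simp2.length := by
      rw [Nat.mod_eq_sub_mod (by omega), Nat.mod_eq_of_lt (by omega)]
    have hmod : PySem.Int.mod ((i : Int) + (simp1.length : Int)) ((simp2.length : Int))
        = ((i + simp1.length - simp2.length : Nat) : Int) := by
      have hc2 : ((i : Int) + (simp1.length : Int)) = (((i + simp1.length : Nat)) : Int) := by push_cast; ring
      rw [hc2, PySem.Int.mod_natCast, hnat]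
    rw [hmod, PySem.List.slice_from_natCast, PySem.List.slice_to_natCast]
    rw [List.drop_append_of_le_length (by omega), List.take_append, List.take_take]
    congr 1
    · exact (List.take_of_length_le (by simp only [List.length_drop]; omega)).symm
    · congr 1
      simp only [List.length_drop]
      omega
  · -- plain window
    have hcast : ¬ ((i : Int) + (simp1.length : Int) > (simp2.length : Int)) := by
      exact_mod_cast hc
    rw [if_neg hcast, PySem.List.slice_natCast_add]
    rw [List.drop_append_of_le_length (by omega),
      List.take_append_of_le_length (by simp only [List.length_drop]; omega)]

theorem goA_cons (simp1 simp2 : List Int) (i : Int) (rest : List Int) :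
    goA simp1 simp2 (i :: rest) =
      if win simp1 simp2 i == simp1 || win simp1 simp2 i == simp1.reverse then
        (if (simp2.length : Int) == (simp1.length : Int) then 2 else 1)
      else goA simp1 simp2 rest := rfl

theorem goA_eq (simp1 simp2 : List Int) (js : List Int) :
    goA simp1 simp2 js =
      if js.any (fun i => win simp1 simp2 i == simp1 || win simp1 simp2 i == simp1.reverse) then
        (if (simp2.length : Int) == (simp1.length : Int) then 2 else 1)
      else 0 := by
  induction js with
  | nil => simp [goA]
  | cons i rest ih =>
    rw [goA_cons, ih, List.any_cons]
    by_cases h : (win simp1 simp2 i == simp1 || win simp1 simp2 i == simp1.reverse) = true <;>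
      simp [h]

-- A's scan finds a hit iff some window of the doubled text equals simp1 or its reverse
theorem anyA_iff (simp1 simp2 : List Int)
    (hl : simp1.length ≤ simp2.length) (hl0 : 0 < simp1.length) :
    ((PySem.List.pyRange 0 (simp2.length : Int) 1).any
        (fun i => win simp1 simp2 i == simp1 || win simp1 simp2 i == simp1.reverse)) = true
      ↔ ∃ k : Nat, 0 ≤ k ∧ k < simp2.length ∧
          (((dbl simp1 simp2).drop k).take simp1.length = simp1 ∨
            ((dbl simp1 simp2).drop k).take simp1.length = simp1.reverse) := by
  simp only [List.any_eq_true, Bool.or_eq_true, beq_iff_eq]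
  constructor
  · rintro ⟨i, hmem, hwin⟩
    have h0i : 0 ≤ i ∧ i < (simp2.length : Int) := by
      simpa [PySem.List.mem_pyRange_one] using hmem
    obtain ⟨k, rfl⟩ : ∃ k : Nat, i = (k : Int) := ⟨i.toNat, (Int.toNat_of_nonneg h0i.1).symm⟩
    have hk : k < simp2.length := by exact_mod_cast h0i.2
    rw [win_eq_dbl simp1 simp2 k hk hl hl0] at hwin
    exact ⟨k, Nat.zero_le k, hk, hwin⟩
  · rintro ⟨k, -, hk, hwin⟩
    refine ⟨(k : Int), ?_, ?_⟩
    · rw [PySem.List.mem_pyRange_one]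
      constructor
      · positivity
      · exact_mod_cast hk
    · rw [win_eq_dbl simp1 simp2 k hk hl hl0]
      exact hwin

-- ===== VERDICT (by name: the statement is the Claim_ definition above) =====
theorem check_if_subsimp_spec : Claim_equal_check_if_subsimp := by
  intro simp1 simp2 _
  unfold Spec_check_if_subsimp check_if_subsimp check_if_subsimp_alt
  by_cases h1 : simp1.length ≤ simp2.length
  · have hAcond : ¬((simp1.length : Int) > (simp2.length : Int)) := by
      simp only [gt_iff_lt, not_lt]; exact_mod_cast h1
    rw [if_neg hAcond, if_neg (by omega)]
    by_cases h0 : simp2.length = 0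
    · have hl0 : simp1.length = 0 := by omega
      rw [if_pos h0]
      rw [h0, Nat.cast_zero, PySem.List.pyRange_one_eq_nil (le_refl 0)]
      rfl
    · rw [if_neg h0]
      by_cases hl0 : simp1.length = 0
      · -- empty pattern, nonempty text: both return 1
        rw [if_pos hl0]
        rw [PySem.List.pyRange_one_cons (by exact_mod_cast Nat.pos_of_ne_zero h0), goA_cons]
        have hwin : win simp1 simp2 0 = [] := by
          unfold win
          rw [if_neg (by simp only [hl0]; push_cast; omega)]
          have h2 : (0 : Int) + (simp1.length : Int) = ((0 : Nat) : Int) + ((0 : Nat) : Int) := by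
            simp [hl0]
          rw [show (0 : Int) = ((0 : Nat) : Int) from rfl] at h2 ⊢
          rw [h2, PySem.List.slice_natCast_add]
          simp
        have hs1 : simp1 = [] := List.length_eq_zero_iff.mp hl0
        have hne2 : simp2 ≠ [] := by
          intro h; exact h0 (by simp [h])
        rw [hwin, hs1]
        simp [hne2]
      · -- main case: 1 ≤ l ≤ n
        rw [if_neg hl0]
        have hl1 : 1 ≤ simp1.length := Nat.one_le_iff_ne_zero.mpr hl0
        have hn1 : 1 ≤ simp2.length := Nat.one_le_iff_ne_zero.mpr h0
        -- B's text is the doubled list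
        have htext : simp2 ++ PySem.List.slice simp2 none (some ((simp1.length : Int) - 1))
            = dbl simp1 simp2 := by
          unfold dbl
          congr 1
          have : (simp1.length : Int) - 1 = ((simp1.length - 1 : Nat) : Int) := by push_cast [hl1]; ring
          rw [this, PySem.List.slice_to_natCast]
        rw [htext]
        have hdlen : (dbl simp1 simp2).length + 1 = simp2.length + simp1.length := by
          unfold dbl
          simp only [List.length_append, List.length_take]
          omega
        -- B's rkFind, via the rolling-hash invariant
        have hM : (0 : Int) < 2 ^ 61 - 1 := by norm_num
        have hfind := rkLoop_iff simp1 simp1.reverse (dbl simp1 simp2) (2 ^ 21) (2 ^ 61 - 1)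
          hM simp2.length hl1 hdlen (simp2.length - 0) 0 rfl
        rw [Nat.cast_zero, List.drop_zero] at hfind
        have hinit : PySem.List.slice (dbl simp1 simp2) none (some ((simp1.length) : Int))
            = (dbl simp1 simp2).take simp1.length := PySem.List.slice_to_natCast _ _
        rw [goA_eq]
        simp only [rkFind]
        simp only [hinit]
        by_cases hhit : ∃ k : Nat, 0 ≤ k ∧ k < simp2.length ∧
            (((dbl simp1 simp2).drop k).take simp1.length = simp1 ∨
              ((dbl simp1 simp2).drop k).take simp1.length = simp1.reverse)
        · rw [if_pos ((anyA_iff simp1 simp2 h1 (by omega)).mpr hhit), if_pos (hfind.mpr hhit)]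
          by_cases hln : simp1.length = simp2.length
          · simp [hln]
          · have h' : ¬ ((simp2.length : Int) = (simp1.length : Int)) := by
              intro h
              exact hln (by exact_mod_cast h.symm)
            simp [h', hln]
        · rw [if_neg (fun hc => hhit ((anyA_iff simp1 simp2 h1 (by omega)).mp hc)),
            if_neg (fun hc => hhit (hfind.mp hc))]
  · have hAcond : ((simp1.length : Int) > (simp2.length : Int)) := by
      simp only [gt_iff_lt]; exact_mod_cast Nat.lt_of_not_le h1
    rw [if_pos hAcond, if_pos (by omega)]
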